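-- pv_equiv track=rewrite | github.com/jonsaadfalcon/spring2024-assignment1-basics | tests/tokenizer.py | most_common_bp
-- ===== SOURCE A (Python) =====
-- def most_common_bp(vocabulary, byte_pair_frequencies):
--
--     most_common_pair = max(byte_pair_frequencies.values())
--     most_common_pairs_overall = []
--     for pair, freq in byte_pair_frequencies.items():
--         if freq == most_common_pair:
--             most_common_pairs_overall.append(pair)
--
--     ###################################################
--
--     most_common_bp_found = []
--     for pair in most_common_pairs_overall:
--         most_common_bp_found.append((vocabulary[pair[0]], vocabulary[pair[1]]))
--
--     ###################################################
--
--     most_frequent_byte_pair = max(most_common_bp_found)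
--     for byte_pair, pair in zip(most_common_bp_found, most_common_pairs_overall):
--         if most_frequent_byte_pair == byte_pair:
--             return pair
-- ===== SOURCE B (Python) =====
-- def most_common_bp(vocabulary, byte_pair_frequencies):
--     # One streaming pass: keep the running maximal frequency and the list of
--     # pairs attaining it (reset whenever a strictly larger frequency appears),
--     # then pick the tied pair with the largest vocab tuple (first wins on ties).
--     best_freq = None
--     tied = []
--     for pair, freq in byte_pair_frequencies.items():
--         if best_freq is None or freq > best_freq:
--             best_freq = freq
--             tied = [pair]
--         elif freq == best_freq:
--             tied.append(pair)
--     return max(tied, key=lambda p: (vocabulary[p[0]], vocabulary[p[1]]))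
-- ===== Notes on version B (the rewrite author's own statement) =====
-- stated objective: alternative
-- what changed: Replaces A's four staged passes (max of all values, then a filtering pass collecting tied pairs, a vocab-tuple list, a tuple max and a zip recovery loop) by one streaming pass that maintains the running maximal frequency with a reset-on-new-max list of tied pairs, followed by a single keyed max over that list.
import Mathlib
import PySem

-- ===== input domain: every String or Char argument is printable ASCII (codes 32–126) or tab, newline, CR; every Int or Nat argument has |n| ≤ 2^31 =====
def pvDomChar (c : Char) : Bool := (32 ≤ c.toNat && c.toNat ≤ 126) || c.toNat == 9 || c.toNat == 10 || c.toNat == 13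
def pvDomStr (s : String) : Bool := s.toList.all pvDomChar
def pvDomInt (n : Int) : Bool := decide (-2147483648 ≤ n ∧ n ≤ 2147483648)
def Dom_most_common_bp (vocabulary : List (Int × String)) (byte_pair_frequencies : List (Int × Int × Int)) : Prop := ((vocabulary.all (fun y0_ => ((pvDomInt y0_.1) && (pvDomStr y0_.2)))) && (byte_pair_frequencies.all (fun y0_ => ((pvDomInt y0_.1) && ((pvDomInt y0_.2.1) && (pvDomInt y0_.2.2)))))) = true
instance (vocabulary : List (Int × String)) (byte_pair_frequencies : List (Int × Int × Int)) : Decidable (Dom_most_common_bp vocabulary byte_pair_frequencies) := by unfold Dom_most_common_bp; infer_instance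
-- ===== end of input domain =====

-- B replaces A's four staged passes (max of all values, tie-collection pass, vocab-tuple
-- list, tuple max + zip recovery loop) by one streaming pass keeping the running maximal
-- frequency with a reset-on-new-max list of tied pairs, then a single keyed max —
-- objective: alternative (streaming) decomposition, same asymptotic cost.

-- vocabulary[k] (dict lookup, first match); the KeyError case (none) is excluded by Pre_,
-- so the "" default is never used on admitted inputs.
def pvLookup (vocabulary : List (Int × String)) (k : Int) : String :=
  (List.lookup k vocabulary).getD ""

-- the vocab tuple (vocabulary[p[0]], vocabulary[p[1]]) of a pair
def pvKey (vocabulary : List (Int × String)) (p : Int × Int) : String × String :=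
  (pvLookup vocabulary p.1, pvLookup vocabulary p.2)

-- Python's '<' on a pair of strings: lexicographic (Lean's Prod '<' is pointwise, hence this helper).
def pvSsLt (a b : String × String) : Bool :=
  decide (a.1 < b.1) || (decide (a.1 = b.1) && decide (a.2 < b.2))

-- ===== PORT A =====

-- the final 'for byte_pair, pair in zip(...): if most_frequent_byte_pair == byte_pair: return pair';
-- falling off the loop is Python's implicit 'return None', unreachable since the max is a member.
def pvFindPair (zs : List ((String × String) × (Int × Int))) (m : String × String) : Int × Int :=
  match zs with
  | [] => (0, 0)
  | (bp, p) :: t => if bp = m then p else pvFindPair t m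

def most_common_bp (vocabulary : List (Int × String)) (byte_pair_frequencies : List (Int × Int × Int)) : Int × Int :=
  match byte_pair_frequencies.map (fun e => e.2.2) with
  | [] => (0, 0)  -- max() of an empty sequence raises ValueError: excluded by Pre_
  | v :: vt =>
    -- max(byte_pair_frequencies.values()): the running-max loop
    let most_common_pair := vt.foldl max v
    let most_common_pairs_overall := byte_pair_frequencies.foldl
      (fun acc e => if e.2.2 = most_common_pair then acc ++ [(e.1, e.2.1)] else acc) []
    let most_common_bp_found := most_common_pairs_overall.foldl
      (fun acc p => acc ++ [(pvLookup vocabulary p.1, pvLookup vocabulary p.2)]) []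
    match most_common_bp_found with
    | [] => (0, 0)  -- unreachable: the maximal frequency is attained by some pair
    | b :: bt =>
      -- max(most_common_bp_found): running max under Python's tuple '<' (first maximal element)
      let most_frequent_byte_pair := bt.foldl (fun m x => if pvSsLt m x then x else m) b
      pvFindPair (most_common_bp_found.zip most_common_pairs_overall) most_frequent_byte_pair

-- ===== PORT B =====

-- one iteration of B's loop; the state is None before the first item, then
-- (best_freq, tied)
def pvBStep (st : Option (Int × List (Int × Int))) (e : Int × Int × Int) :
    Option (Int × List (Int × Int)) :=
  match st with
  | none => some (e.2.2, [(e.1, e.2.1)])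
  | some (bf, tied) =>
    if bf < e.2.2 then some (e.2.2, [(e.1, e.2.1)])
    else if e.2.2 = bf then some (bf, tied ++ [(e.1, e.2.1)])
    else some (bf, tied)

def most_common_bp_alt (vocabulary : List (Int × String)) (byte_pair_frequencies : List (Int × Int × Int)) : Int × Int :=
  match byte_pair_frequencies.foldl pvBStep none with
  | none => (0, 0)  -- empty dict: max() of the empty tied list raises ValueError, outside Pre_
  | some (_, tied) =>
    -- max(tied, key=...): running keyed max, first maximal element
    match tied with
    | [] => (0, 0)  -- unreachable: tied is never empty once the loop ran
    | p :: ps =>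
      ps.foldl (fun best x => if pvSsLt (pvKey vocabulary best) (pvKey vocabulary x) then x else best) p

-- ===== PRECONDITION & SPEC =====
-- Pre_ excludes exactly the raising inputs: an empty dict (ValueError from max) and a
-- maximal-frequency pair referring to an id absent from vocabulary (KeyError; both A and B
-- only ever look up the pairs of maximal frequency).
def Pre_most_common_bp (vocabulary : List (Int × String)) (byte_pair_frequencies : List (Int × Int × Int)) : Prop :=
  byte_pair_frequencies ≠ [] ∧
    ∀ e ∈ byte_pair_frequencies, (∀ x ∈ byte_pair_frequencies, x.2.2 ≤ e.2.2) →
      e.1 ∈ vocabulary.map Prod.fst ∧ e.2.1 ∈ vocabulary.map Prod.fst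
instance (vocabulary : List (Int × String)) (byte_pair_frequencies : List (Int × Int × Int)) : Decidable (Pre_most_common_bp vocabulary byte_pair_frequencies) := by unfold Pre_most_common_bp; infer_instance

def pvWitness_most_common_bp : (List (Int × String)) × (List (Int × Int × Int)) :=
  ([(0, "a"), (1, "b")], [(0, 1, 2), (1, 0, 2)])

def Spec_most_common_bp (vocabulary : List (Int × String)) (byte_pair_frequencies : List (Int × Int × Int)) (out : Int × Int) : Prop := out = most_common_bp_alt vocabulary byte_pair_frequencies
instance (vocabulary : List (Int × String)) (byte_pair_frequencies : List (Int × Int × Int)) (out : Int × Int) : Decidable (Spec_most_common_bp vocabulary byte_pair_frequencies out) := by unfold Spec_most_common_bp; infer_instance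

-- ===== CLAIM (what is proved, stated in full; the proofs are below) =====
def Claim_equal_most_common_bp : Prop := ∀ (vocabulary : List (Int × String)) (byte_pair_frequencies : List (Int × Int × Int)), Dom_most_common_bp vocabulary byte_pair_frequencies → Pre_most_common_bp vocabulary byte_pair_frequencies → Spec_most_common_bp vocabulary byte_pair_frequencies (most_common_bp vocabulary byte_pair_frequencies)

-- ===== LEMMAS AND PROOFS =====

-- proof-only bridge: "filter the maximal-frequency pairs, then keyed argmax" — both
-- ports are proved equal to this form
def pvRef (vocabulary : List (Int × String)) (byte_pair_frequencies : List (Int × Int × Int)) : Int × Int :=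
  match byte_pair_frequencies.map (fun e => e.2.2) with
  | [] => (0, 0)
  | v :: vt =>
    let M := vt.foldl max v
    match (byte_pair_frequencies.filter (fun e => decide (e.2.2 = M))).map
        (fun e => (e.1, e.2.1)) with
    | [] => (0, 0)
    | p :: ps =>
      ps.foldl (fun best x => if pvSsLt (pvKey vocabulary best) (pvKey vocabulary x) then x else best) p

-- --- pvSsLt is a strict linear order (irrefl, trans, trichotomy) ---

theorem pvSsLt_irrefl (a : String × String) : pvSsLt a a = false := by simp [pvSsLt]

theorem pvSsLt_trans (a b c : String × String) (h1 : pvSsLt a b = true)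
    (h2 : pvSsLt b c = true) : pvSsLt a c = true := by
  simp only [pvSsLt, Bool.or_eq_true, Bool.and_eq_true, decide_eq_true_eq] at *
  rcases h1 with h1 | ⟨h1e, h1'⟩ <;> rcases h2 with h2 | ⟨h2e, h2'⟩
  · exact Or.inl (lt_trans h1 h2)
  · exact Or.inl (h2e ▸ h1)
  · exact Or.inl (h1e ▸ h2)
  · exact Or.inr ⟨h1e.trans h2e, lt_trans h1' h2'⟩

theorem pvSsLt_tri (a b : String × String) :
    pvSsLt a b = true ∨ pvSsLt b a = true ∨ a = b := by
  obtain ⟨a1, a2⟩ := a; obtain ⟨b1, b2⟩ := b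
  simp only [pvSsLt, Bool.or_eq_true, Bool.and_eq_true, decide_eq_true_eq, Prod.mk.injEq]
  rcases lt_trichotomy a1 b1 with h | h | h
  · exact Or.inl (Or.inl h)
  · rcases lt_trichotomy a2 b2 with h' | h' | h'
    · exact Or.inl (Or.inr ⟨h, h'⟩)
    · exact Or.inr (Or.inr ⟨h, h'⟩)
    · exact Or.inr (Or.inl (Or.inr ⟨h.symm, h'⟩))
  · exact Or.inr (Or.inl (Or.inl h))

-- --- generic consequences for a strict linear order given as a Bool relation ---

theorem pvLt_asymm {α : Type} (lt : α → α → Bool)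
    (hirr : ∀ a, lt a a = false)
    (htr : ∀ a b c, lt a b = true → lt b c = true → lt a c = true)
    (a b : α) (h : lt a b = true) : lt b a = false := by
  by_contra hc
  have := htr a b a h (by revert hc; cases hh : lt b a <;> simp)
  rw [hirr a] at this; exact absurd this (by simp)

theorem pvLt_neg_trans {α : Type} (lt : α → α → Bool)
    (hirr : ∀ a, lt a a = false)
    (htr : ∀ a b c, lt a b = true → lt b c = true → lt a c = true)
    (htri : ∀ a b, lt a b = true ∨ lt b a = true ∨ a = b)
    (a b c : α) (h1 : lt a b = false) (h2 : lt b c = false) : lt a c = false := by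
  rcases htri a b with hab | hba | hab
  · rw [hab] at h1; exact absurd h1 (by simp)
  · rcases htri b c with hbc | hcb | hbc
    · rw [hbc] at h2; exact absurd h2 (by simp)
    · exact pvLt_asymm lt hirr htr c a (htr c b a hcb hba)
    · exact hbc ▸ pvLt_asymm lt hirr htr _ _ hba
  · rcases htri b c with hbc | hcb | hbc
    · rw [hbc] at h2; exact absurd h2 (by simp)
    · exact hab ▸ pvLt_asymm lt hirr htr _ _ hcb
    · rw [hab, hbc, hirr]

theorem pvSsLt_neg_trans (a b c : String × String) :
    pvSsLt a b = false → pvSsLt b c = false → pvSsLt a c = false :=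
  pvLt_neg_trans pvSsLt pvSsLt_irrefl pvSsLt_trans pvSsLt_tri a b c

-- --- characterisation of the running-argmax fold: its result sits at some position i,
--     everything strictly before position i is lt-below it, and nothing is lt-above it ---
theorem pvArgmax_pos {α : Type} (lt : α → α → Bool)
    (hirr : ∀ a, lt a a = false)
    (htr : ∀ a b c, lt a b = true → lt b c = true → lt a c = true)
    (hneg : ∀ a b c, lt a b = false → lt b c = false → lt a c = false) :
    ∀ (t : List α) (e : α),
      ∃ i : Nat, (e :: t)[i]? = some (t.foldl (fun m x => if lt m x then x else m) e) ∧
        (∀ j, j < i → ∀ x, (e :: t)[j]? = some x →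
          lt x (t.foldl (fun m x => if lt m x then x else m) e) = true) ∧
        (∀ x ∈ e :: t, lt (t.foldl (fun m x => if lt m x then x else m) e) x = false) := by
  intro t
  induction t with
  | nil =>
    intro e
    refine ⟨0, rfl, ?_, ?_⟩
    · intro j hj; omega
    · intro x hx
      simp only [List.mem_singleton] at hx
      subst hx
      simpa using hirr x
  | cons y t ih =>
    intro e
    rw [List.foldl_cons]
    by_cases h : lt e y = true
    · rw [if_pos h]
      obtain ⟨i, hget, hbefore, hmax⟩ := ih y
      refine ⟨i + 1, by simpa using hget, ?_, ?_⟩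
      · intro j hj x hx
        cases j with
        | zero =>
          have hxe : x = e := by
            simp only [List.getElem?_cons_zero, Option.some.injEq] at hx
            exact hx.symm
          subst hxe
          have hy : lt (t.foldl (fun m x => if lt m x then x else m) y) y = false :=
            hmax y List.mem_cons_self
          rcases Bool.eq_false_or_eq_true (lt x (t.foldl (fun m x => if lt m x then x else m) y)) with hc | hc
          · exact hc
          · have := hneg _ _ _ hc hy
            rw [this] at h
            exact absurd h (by simp)
        | succ j' =>
          exact hbefore j' (by omega) x (by simpa using hx)
      · intro x hx
        rcases List.mem_cons.1 hx with hxe | hx'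
        · subst hxe
          have hy : lt (t.foldl (fun m x₀ => if lt m x₀ then x₀ else m) y) y = false :=
            hmax y List.mem_cons_self
          have hye : lt y x = false := pvLt_asymm lt hirr htr _ _ h
          exact hneg _ _ _ hy hye
        · exact hmax x hx'
    · rw [if_neg h]
      have h' : lt e y = false := by revert h; cases lt e y <;> simp
      obtain ⟨i, hget, hbefore, hmax⟩ := ih e
      cases i with
      | zero =>
        have hre : t.foldl (fun m x => if lt m x then x else m) e = e := by
          simpa using hget.symm
        refine ⟨0, by simp [hre], ?_, ?_⟩
        · intro j hj; omega
        · intro x hx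
          rcases List.mem_cons.1 hx with hxe | hx'
          · rw [hre, hxe]; exact hirr e
          · rcases List.mem_cons.1 hx' with hxy | hx''
            · rw [hre, hxy]; exact h'
            · exact hmax x (List.mem_cons.2 (Or.inr hx''))
      | succ i' =>
        refine ⟨i' + 2, by simpa using hget, ?_, ?_⟩
        · intro j hj x hx
          cases j with
          | zero =>
            have hxe : x = e := by
              simp only [List.getElem?_cons_zero, Option.some.injEq] at hx
              exact hx.symm
            subst hxe
            exact hbefore 0 (by omega) x rfl
          | succ j' =>
            cases j' with
            | zero =>
              have hxy : x = y := by
                simp only [List.getElem?_cons_succ, List.getElem?_cons_zero,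
                  Option.some.injEq] at hx
                exact hx.symm
              subst hxy
              have he : lt e (t.foldl (fun m x₀ => if lt m x₀ then x₀ else m) e) = true :=
                hbefore 0 (by omega) e rfl
              rcases Bool.eq_false_or_eq_true (lt x (t.foldl (fun m x₀ => if lt m x₀ then x₀ else m) e)) with hc | hc
              · exact hc
              · have := hneg _ _ _ h' hc
                rw [this] at he
                exact absurd he (by simp)
            | succ j'' =>
              exact hbefore (j'' + 1) (by omega) x (by simpa using hx)
        · intro x hx
          rcases List.mem_cons.1 hx with hxe | hx'
          · subst hxe; exact hmax x List.mem_cons_self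
          · rcases List.mem_cons.1 hx' with hxy | hx''
            · subst hxy
              have hee : lt (t.foldl (fun m x₀ => if lt m x₀ then x₀ else m) e) e = false :=
                hmax e List.mem_cons_self
              exact hneg _ _ _ hee h'
            · exact hmax x (List.mem_cons.2 (Or.inr hx''))

-- find? returns the element at position i when it satisfies p and everything earlier fails p
theorem pvFind?_of_first {α : Type} (p : α → Bool) :
    ∀ (l : List α) (i : Nat) (r : α), l[i]? = some r → p r = true →
      (∀ j, j < i → ∀ x, l[j]? = some x → p x = false) → l.find? p = some r := by
  intro l
  induction l with
  | nil => intro i r h; simp at h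
  | cons a t ih =>
    intro i r hget hp hbefore
    match i, hget with
    | 0, hget =>
      simp only [List.getElem?_cons_zero, Option.some.injEq] at hget
      subst hget; simp [List.find?, hp]
    | (i' + 1), hget =>
      have ha : p a = false := hbefore 0 (by omega) a rfl
      simp only [List.find?, ha]
      exact ih i' r (by simpa using hget) hp
        (fun j hj x hx => hbefore (j + 1) (by omega) x (by simpa using hx))

-- A's final zip loop is find? over the second component list
theorem pvFindPair_zip (g : Int × Int → String × String) (v : String × String) :
    ∀ (F : List (Int × Int)),
      pvFindPair ((F.map g).zip F) v = ((F.find? (fun p => decide (g p = v))).getD (0, 0)) := by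
  intro F
  induction F with
  | nil => rfl
  | cons a t ih =>
    simp only [List.map_cons, List.zip_cons_cons, pvFindPair, List.find?]
    by_cases h : g a = v <;> simp [h, ih]

-- the tuple of the keyed argmax is the plain argmax of the tuples
theorem pvFoldMap (vocabulary : List (Int × String)) :
    ∀ (ps : List (Int × Int)) (p : Int × Int),
      (ps.map (pvKey vocabulary)).foldl
          (fun m x => if pvSsLt m x then x else m) (pvKey vocabulary p)
        = pvKey vocabulary
            (ps.foldl (fun best x =>
              if pvSsLt (pvKey vocabulary best) (pvKey vocabulary x) then x else best) p) := by
  intro ps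
  induction ps with
  | nil => intro p; rfl
  | cons x t ih =>
    intro p
    simp only [List.map_cons, List.foldl_cons]
    by_cases h : pvSsLt (pvKey vocabulary p) (pvKey vocabulary x) = true
    · rw [if_pos h, if_pos h]
      exact ih x
    · rw [if_neg h, if_neg h]
      exact ih p

-- the core equivalence on the list of tied pairs: A's (tuple max + recovery loop)
-- equals the keyed running argmax
theorem pvCore (vocabulary : List (Int × String)) (p : Int × Int) (ps : List (Int × Int)) :
    pvFindPair
        ((((p :: ps).map (pvKey vocabulary)).zip (p :: ps)))
        ((ps.map (pvKey vocabulary)).foldl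
          (fun m x => if pvSsLt m x then x else m) (pvKey vocabulary p))
      = ps.foldl (fun best x =>
          if pvSsLt (pvKey vocabulary best) (pvKey vocabulary x) then x else best) p := by
  have harg := pvArgmax_pos
    (fun a b => pvSsLt (pvKey vocabulary a) (pvKey vocabulary b))
    (fun a => pvSsLt_irrefl _) (fun a b c => pvSsLt_trans _ _ _)
    (fun a b c => pvSsLt_neg_trans _ _ _) ps p
  beta_reduce at harg
  obtain ⟨i, hget, hbefore, hmax⟩ := harg
  set r := ps.foldl (fun best x =>
      if pvSsLt (pvKey vocabulary best) (pvKey vocabulary x) = true then x else best) p with hr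
  rw [pvFoldMap, pvFindPair_zip]
  have hfind := pvFind?_of_first
    (fun q => decide (pvKey vocabulary q = pvKey vocabulary r))
    (p :: ps) i r hget (by simp) ?_
  · rw [hfind]
    simp
  · intro j hj x hx
    have hb := hbefore j hj x hx
    cases hdec : decide (pvKey vocabulary x = pvKey vocabulary r) with
    | false => simpa using hdec
    | true =>
      exfalso
      simp only [decide_eq_true_eq] at hdec
      rw [hdec, pvSsLt_irrefl] at hb
      exact absurd hb (by simp)

-- A equals the reference form, on a non-empty frequency list
theorem most_common_bp_eq_ref (vocabulary : List (Int × String)) (e : Int × Int × Int)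
    (t : List (Int × Int × Int)) :
    most_common_bp vocabulary (e :: t) = pvRef vocabulary (e :: t) := by
  simp only [most_common_bp, pvRef, List.map_cons]
  rw [PySem.List.foldl_append_ite, PySem.List.foldl_append_singleton_eq_map]
  simp only [List.nil_append]
  set M := List.foldl max e.2.2 (List.map (fun e => e.2.2) t) with hM
  -- the maximal frequency is attained, so the filtered list is non-empty
  have hMmem : ∃ x ∈ e :: t, x.2.2 = M := by
    rcases PySem.List.foldl_max_mem (List.map (fun e => e.2.2) t) e.2.2 with h | h
    · exact ⟨e, List.mem_cons_self, by rw [hM, h]⟩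
    · obtain ⟨x, hx, hfx⟩ := List.mem_map.1 h
      exact ⟨x, List.mem_cons.2 (Or.inr hx), hfx⟩
  have hFne : List.filter (fun x => decide (x.2.2 = M)) (e :: t) ≠ [] := by
    obtain ⟨m, hm, hfm⟩ := hMmem
    intro hnil
    have : m ∈ List.filter (fun x => decide (x.2.2 = M)) (e :: t) :=
      List.mem_filter.2 ⟨hm, by simp [hfm]⟩
    rw [hnil] at this
    exact absurd this (List.not_mem_nil)
  obtain ⟨F0, Ft, hFe⟩ := List.exists_cons_of_ne_nil hFne
  rw [hFe]
  simp only [List.map_cons]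
  have := pvCore vocabulary (F0.1, F0.2.1) (List.map (fun e => (e.1, e.2.1)) Ft)
  simpa [pvKey] using this

-- --- B's streaming pass equals the reference form ---

-- fold invariant: from state (f, acc), B's loop over t ends with the overall maximal
-- frequency F and the tied list: acc (kept iff f = F) followed by the pairs of t tied with F
theorem pvBFold :
    ∀ (t : List (Int × Int × Int)) (f : Int) (acc : List (Int × Int)),
      t.foldl pvBStep (some (f, acc)) =
        some ((t.map (fun e => e.2.2)).foldl max f,
          (if f = (t.map (fun e => e.2.2)).foldl max f then acc else []) ++
            (t.filter (fun e => decide (e.2.2 = (t.map (fun e => e.2.2)).foldl max f))).map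
              (fun e => (e.1, e.2.1))) := by
  intro t
  induction t with
  | nil =>
    intro f acc
    simp
  | cons x t ih =>
    intro f acc
    have hle : ∀ (a : Int), a ≤ (t.map (fun e => e.2.2)).foldl max a :=
      fun a => (PySem.List.le_foldl_max _ a).1
    simp only [List.map_cons, List.foldl_cons, List.filter_cons]
    by_cases h1 : f < x.2.2
    · -- new strict running max: the tied list is reset to [x's pair]
      have hstep : pvBStep (some (f, acc)) x = some (x.2.2, [(x.1, x.2.1)]) := by
        simp [pvBStep, if_pos h1]
      have hmax : max f x.2.2 = x.2.2 := by omega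
      have hfne : f ≠ (t.map (fun e => e.2.2)).foldl max x.2.2 := by
        have := hle x.2.2; omega
      rw [hstep, ih]
      simp only [hmax]
      rw [if_neg hfne]
      by_cases hx : x.2.2 = (t.map (fun e => e.2.2)).foldl max x.2.2
      · rw [if_pos (decide_eq_true hx), if_pos hx]
        simp
      · rw [if_neg (fun h => hx (of_decide_eq_true h)), if_neg hx]
    · by_cases h2 : x.2.2 = f
      · -- tie with the running max: x's pair is appended
        have hstep : pvBStep (some (f, acc)) x = some (f, acc ++ [(x.1, x.2.1)]) := by
          simp [pvBStep, if_neg (by omega : ¬ f < x.2.2), if_pos h2]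
        have hmax : max f x.2.2 = f := by omega
        rw [hstep, ih]
        simp only [hmax]
        by_cases hf : f = (t.map (fun e => e.2.2)).foldl max f
        · have hx : x.2.2 = (t.map (fun e => e.2.2)).foldl max f := by omega
          rw [if_pos (decide_eq_true hx), if_pos hf, if_pos hf]
          simp
        · have hx : ¬ x.2.2 = (t.map (fun e => e.2.2)).foldl max f := by omega
          rw [if_neg (fun h => hx (of_decide_eq_true h)), if_neg hf, if_neg hf]
      · -- strictly below the running max: state unchanged
        have hstep : pvBStep (some (f, acc)) x = some (f, acc) := by
          simp [pvBStep, if_neg (by omega : ¬ f < x.2.2), if_neg h2]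
        have hmax : max f x.2.2 = f := by omega
        have hx : ¬ x.2.2 = (t.map (fun e => e.2.2)).foldl max f := by
          have := hle f; omega
        rw [hstep, ih]
        simp only [hmax]
        rw [if_neg (fun h => hx (of_decide_eq_true h))]

-- B equals the reference form, on a non-empty frequency list
theorem most_common_bp_alt_eq_ref (vocabulary : List (Int × String)) (e : Int × Int × Int)
    (t : List (Int × Int × Int)) :
    most_common_bp_alt vocabulary (e :: t) = pvRef vocabulary (e :: t) := by
  simp only [most_common_bp_alt, pvRef, List.map_cons, List.foldl_cons]
  have hstep : pvBStep none e = some (e.2.2, [(e.1, e.2.1)]) := rfl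
  rw [hstep, pvBFold]
  set M := (t.map (fun e => e.2.2)).foldl max e.2.2 with hM
  have hlist : (if e.2.2 = M then [(e.1, e.2.1)] else []) ++
      (t.filter (fun x => decide (x.2.2 = M))).map (fun e => (e.1, e.2.1))
      = ((e :: t).filter (fun x => decide (x.2.2 = M))).map (fun e => (e.1, e.2.1)) := by
    rw [List.filter_cons]
    by_cases hf : e.2.2 = M
    · rw [if_pos hf, if_pos (decide_eq_true hf)]
      simp
    · rw [if_neg hf, if_neg (fun h => hf (of_decide_eq_true h))]
      simp
  rw [hlist]

-- ===== VERDICT (by name: the statement is the Claim_ definition above) =====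
theorem most_common_bp_spec : Claim_equal_most_common_bp := by
  intro vocabulary byte_pair_frequencies _ hpre
  unfold Spec_most_common_bp
  cases byte_pair_frequencies with
  | nil => exact absurd rfl hpre.1
  | cons e t =>
    rw [most_common_bp_eq_ref, most_common_bp_alt_eq_ref]
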